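-- pv_equiv track=rewrite | github.com/faithdrums7/Practices | tryout2_soal5.py | ganjilMix
-- ===== SOURCE A (Python) =====
-- def ganjilMix(batas):
--     angka_ganjil = []
--     for ganjil in range(batas):           # looping untuk memasukkan semua angka ganjil ke dalam list kosong
--         if ganjil%2 != 0:                 # kondisi angka ganjil adalah jika di mod 2 hasilnya bukan 0
--             angka_ganjil.append(ganjil)
--
--     for i in range(len(angka_ganjil)):    #looping untuk setiap angka dijadikan minus
--         if i%2 != 0:
--             angka_ganjil[i] = angka_ganjil[i] * -1
--
--     return angka_ganjil
-- ===== SOURCE B (Python) =====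
-- def ganjilMix(batas):
--     # Split the output into its two interleaved arithmetic progressions and zip-merge them:
--     # even slots hold 4m+1, odd slots hold -(4m+3); no filtering, no in-place negation pass.
--     c = batas // 2 if batas > 0 else 0          # how many odd numbers below batas
--     pos = [4 * m + 1 for m in range((c + 1) // 2)]   # values destined for even positions
--     neg = [-(4 * m + 3) for m in range(c // 2)]      # values destined for odd positions
--     out = []
--     for p, n in zip(pos, neg):
--         out.append(p)
--         out.append(n)
--     if c % 2:
--         out.append(pos[-1])                     # odd count: one trailing positive left over
--     return out
-- ===== Notes on version B (the rewrite author's own statement) =====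
-- stated objective: alternative
-- what changed: A filters range(batas) for odd numbers and then revisits the list in a second index loop negating odd positions in place; B never filters or mutates: it generates the two interleaved arithmetic progressions of the result (4m+1 for even slots, -(4m+3) for odd slots) as separate lists and zip-merges them, appending the leftover positive when the count is odd.
import Mathlib
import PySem

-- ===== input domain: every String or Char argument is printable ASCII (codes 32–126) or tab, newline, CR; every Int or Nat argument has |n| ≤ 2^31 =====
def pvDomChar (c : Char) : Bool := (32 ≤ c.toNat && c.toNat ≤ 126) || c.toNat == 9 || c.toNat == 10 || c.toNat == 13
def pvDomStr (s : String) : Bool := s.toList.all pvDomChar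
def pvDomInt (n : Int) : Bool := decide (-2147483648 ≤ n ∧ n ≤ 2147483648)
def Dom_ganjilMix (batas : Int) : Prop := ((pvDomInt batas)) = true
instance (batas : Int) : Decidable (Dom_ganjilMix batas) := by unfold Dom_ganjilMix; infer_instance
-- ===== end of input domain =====

-- B replaces A's filter-then-mutate (collect odds from range(batas), then a second index
-- loop negating odd positions in place) by generating the result's two interleaved
-- arithmetic progressions (4m+1 / -(4m+3)) and zip-merging them; objective: alternative.

-- ===== PORT A =====
-- local variable angka_ganjil after A's first loop (for ganjil in range(batas): if ganjil % 2 != 0: append)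
def pvAngka (batas : Int) : List Int :=
  (PySem.List.pyRange 0 batas 1).foldl
    (fun acc g => if PySem.Int.mod g 2 ≠ 0 then acc ++ [g] else acc) []

def ganjilMix (batas : Int) : List Int :=
  -- second loop: for i in range(len(angka_ganjil)): if i % 2 != 0: angka_ganjil[i] = angka_ganjil[i] * -1
  (PySem.List.pyRange 0 (PySem.List.len (pvAngka batas)) 1).foldl
    (fun ys i => if PySem.Int.mod i 2 ≠ 0
                 then PySem.List.pySetD ys i (PySem.List.pyGetD ys i 0 * -1) else ys)
    (pvAngka batas)

-- ===== PORT B =====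
def ganjilMix_alt (batas : Int) : List Int :=
  let c : Int := if 0 < batas then PySem.Int.floordiv batas 2 else 0
  let pos : List Int := (PySem.List.pyRange 0 (PySem.Int.floordiv (c + 1) 2) 1).map (fun m => 4 * m + 1)
  let neg : List Int := (PySem.List.pyRange 0 (PySem.Int.floordiv c 2) 1).map (fun m => -(4 * m + 3))
  let out : List Int := (pos.zip neg).foldl (fun acc pn => acc ++ [pn.1] ++ [pn.2]) []
  -- pos[-1]: exact here since the branch is only taken when c is odd, so pos ≠ []
  if PySem.Int.mod c 2 ≠ 0 then out ++ [PySem.List.pyGetD pos (-1) 0] else out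

-- ===== PRECONDITION & SPEC =====
def Spec_ganjilMix (batas : Int) (out : List Int) : Prop := out = ganjilMix_alt batas
instance (batas : Int) (out : List Int) : Decidable (Spec_ganjilMix batas out) := by unfold Spec_ganjilMix; infer_instance

-- ===== CLAIM (what is proved, stated in full; the proofs are below) =====
def Claim_equal_ganjilMix : Prop := ∀ (batas : Int), Dom_ganjilMix batas → Spec_ganjilMix batas (ganjilMix batas)

-- ===== LEMMAS AND PROOFS =====

-- A's first loop over range(batas): collecting the odds of 0..n-1 yields 1,3,…, i.e. 2k+1 for k < n/2.
lemma oddsFold (n : Nat) (acc : List Int) :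
    List.foldl (fun acc g => if PySem.Int.mod g 2 ≠ 0 then acc ++ [g] else acc) acc
      ((List.range n).map (fun (k : Nat) => ((k : Int))))
    = acc ++ (List.range (n / 2)).map (fun (k : Nat) => 2 * (k : Int) + 1) := by
  induction n with
  | zero => simp
  | succ n ih =>
    have hm : PySem.Int.mod (n : Int) 2 = ((n % 2 : Nat) : Int) := by
      exact_mod_cast PySem.Int.mod_natCast n 2
    rw [List.range_succ, List.map_append, List.foldl_append, ih]
    rcases Nat.mod_two_eq_zero_or_one n with h | h
    · have h2 : (n + 1) / 2 = n / 2 := by omega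
      have hd : (2 : Int) ∣ (n : Int) := by omega
      simp [h2, hd]
    · have h2 : (n + 1) / 2 = n / 2 + 1 := by omega
      have hd : ((n : Int)) % 2 = 1 := by omega
      simp [h2, List.range_succ, hd]
      omega

-- A's second loop over range(n): negate the odd-index entries of the first n places.
lemma negLoop (xs : List Int) (n : Nat) (hn : n ≤ xs.length) :
    ((PySem.List.pyRange 0 (n : Int) 1).foldl
      (fun ys i => if PySem.Int.mod i 2 ≠ 0
                   then PySem.List.pySetD ys i (PySem.List.pyGetD ys i 0 * -1) else ys) xs)
    = xs.mapIdx (fun j x => if j < n ∧ j % 2 = 1 then -x else x) := by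
  induction n with
  | zero =>
    simp
    exact (List.ext_getElem (by simp) (by intro i h1 h2; simp)).symm
  | succ n ih =>
    have hle : n ≤ xs.length := by omega
    have hcast : ((n + 1 : Nat) : Int) = (n : Int) + 1 := by push_cast; ring
    rw [hcast, PySem.List.pyRange_one_succ_right (by positivity), List.foldl_append,
        ih hle]
    have hm : PySem.Int.mod (n : Int) 2 = ((n % 2 : Nat) : Int) := by
      exact_mod_cast PySem.Int.mod_natCast n 2
    simp only [List.foldl_cons, List.foldl_nil, hm]
    rcases Nat.mod_two_eq_zero_or_one n with h | h
    · rw [h, if_neg (by simp)]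
      apply List.ext_getElem (by simp)
      intro j h1 h2
      simp only [List.getElem_mapIdx]
      exact if_congr (by omega) rfl rfl
    · rw [h, if_pos (by simp), PySem.List.pySetD_natCast, PySem.List.pyGetD_natCast]
      have hlen : n < (List.mapIdx (fun j x => if j < n ∧ j % 2 = 1 then -x else x) xs).length := by
        simp; omega
      rw [List.getD_eq_getElem _ _ hlen]
      apply List.ext_getElem (by simp)
      intro j h1 h2
      rw [List.getElem_set]
      simp only [List.getElem_mapIdx]
      by_cases hj : n = j
      · subst hj
        rw [if_pos rfl, if_neg (by omega), if_pos (by omega)]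
        ring
      · rw [if_neg hj]
        exact if_congr (by omega) rfl rfl

-- A in closed form.
lemma A_closed (batas : Int) :
    ganjilMix batas
    = ((List.range (batas.toNat / 2)).map (fun (k : Nat) => 2 * (k : Int) + 1)).mapIdx
        (fun j x => if j < batas.toNat / 2 ∧ j % 2 = 1 then -x else x) := by
  have hA : pvAngka batas = (List.range (batas.toNat / 2)).map (fun (k : Nat) => 2 * (k : Int) + 1) := by
    unfold pvAngka
    have h1 : PySem.List.pyRange 0 batas 1
        = (List.range batas.toNat).map (fun (k : Nat) => ((k : Int))) := by
      rw [PySem.List.pyRange_one]; simp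
    rw [h1, oddsFold]
    simp
  have hlen : (pvAngka batas).length = batas.toNat / 2 := by simp [hA]
  unfold ganjilMix
  have h2 : PySem.List.len (pvAngka batas) = ((batas.toNat / 2 : Nat) : Int) := by
    simp [PySem.List.len_eq, hlen]
  rw [h2, negLoop (pvAngka batas) (batas.toNat / 2) (by omega), hA]

-- flatMap form of B's zip-merge loop (two appends per pair).
lemma zipFlat (f g : Nat → Int) (n : Nat) :
    (((List.range n).map f).zip ((List.range n).map g)).flatMap (fun pn => [pn.1, pn.2])
    = (List.range (2 * n)).map (fun j => if j % 2 = 0 then f (j / 2) else g (j / 2)) := by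
  induction n with
  | zero => simp
  | succ n ih =>
    rw [List.range_succ, List.map_append, List.map_append,
        List.zip_append (by simp), List.flatMap_append, ih]
    have h2 : 2 * (n + 1) = (2 * n + 1) + 1 := by ring
    rw [h2, List.range_succ, List.range_succ, List.map_append, List.map_append]
    have e1 : (2 * n) % 2 = 0 := by omega
    have e2 : (2 * n) / 2 = n := by omega
    have e3 : (2 * n + 1) % 2 = 1 := by omega
    have e4 : (2 * n + 1) / 2 = n := by omega
    simp [e1, e2, e3, e4]

-- B in closed form.
lemma B_closed (batas : Int) :
    ganjilMix_alt batas
    = (List.range (batas.toNat / 2)).map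
        (fun (k : Nat) => if k % 2 = 0 then 2 * (k : Int) + 1 else -(2 * (k : Int) + 1)) := by
  unfold ganjilMix_alt
  set q : Nat := batas.toNat / 2 with hq
  have hc : (if 0 < batas then PySem.Int.floordiv batas 2 else 0) = ((q : Nat) : Int) := by
    split_ifs with h
    · rw [PySem.Int.floordiv_eq_ediv_of_pos (by norm_num)]; omega
    · omega
  rw [hc]
  dsimp only
  have hrange : ∀ (k : Nat), PySem.List.pyRange 0 ((k : Nat) : Int) 1
      = (List.range k).map (fun (m : Nat) => ((m : Int))) := by
    intro k; rw [PySem.List.pyRange_one]; simp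
  have hpos : (PySem.List.pyRange 0 (PySem.Int.floordiv (((q : Nat) : Int) + 1) 2) 1).map
        (fun m => 4 * m + 1)
      = (List.range ((q + 1) / 2)).map (fun (m : Nat) => 4 * (m : Int) + 1) := by
    have h1 : ((q : Nat) : Int) + 1 = (((q + 1 : Nat)) : Int) := by push_cast; ring
    rw [h1, show PySem.Int.floordiv (((q + 1 : Nat)) : Int) 2 = (((q + 1) / 2 : Nat) : Int) from
        by exact_mod_cast PySem.Int.floordiv_natCast (q + 1) 2, hrange, List.map_map]
    rfl
  have hneg : (PySem.List.pyRange 0 (PySem.Int.floordiv ((q : Nat) : Int) 2) 1).map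
        (fun m => -(4 * m + 3))
      = (List.range (q / 2)).map (fun (m : Nat) => -(4 * (m : Int) + 3)) := by
    rw [show PySem.Int.floordiv ((q : Nat) : Int) 2 = ((q / 2 : Nat) : Int) from
        by exact_mod_cast PySem.Int.floordiv_natCast q 2, hrange, List.map_map]
    rfl
  rw [hpos, hneg]
  have hfold : ∀ (l : List (Int × Int)),
      l.foldl (fun acc pn => acc ++ [pn.1] ++ [pn.2]) ([] : List Int)
      = l.flatMap (fun pn => [pn.1, pn.2]) := by
    intro l
    have := PySem.List.foldl_append_eq_flatMap (fun pn : Int × Int => [pn.1, pn.2]) l ([] : List Int)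
    simpa using this
  have hm : PySem.Int.mod ((q : Nat) : Int) 2 = ((q % 2 : Nat) : Int) := by
    exact_mod_cast PySem.Int.mod_natCast q 2
  rcases Nat.mod_two_eq_zero_or_one q with h | h
  · -- even count: zip is exact, no trailing append
    obtain ⟨r, hr⟩ : ∃ r, q = 2 * r := ⟨q / 2, by omega⟩
    have hp : (q + 1) / 2 = r := by omega
    have hr2 : q / 2 = r := by omega
    rw [hm, h]
    simp only [Nat.cast_zero, ne_eq, not_true_eq_false, if_false]
    rw [hp, hr2, hfold, zipFlat, show 2 * r = q from hr.symm]
    · apply List.map_congr_left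
      intro k hk
      rcases Nat.mod_two_eq_zero_or_one k with hk2 | hk2
      · simp [hk2]
        omega
      · simp [hk2]
        omega
  · -- odd count: pos has one extra element, appended after the zip
    obtain ⟨r, hr⟩ : ∃ r, q = 2 * r + 1 := ⟨q / 2, by omega⟩
    have hp : (q + 1) / 2 = r + 1 := by omega
    have hr2 : q / 2 = r := by omega
    rw [hm, h, hp, hr2]
    simp only [Nat.cast_one, ne_eq, one_ne_zero, not_false_eq_true, if_true]
    rw [List.range_succ, List.map_append, List.map_singleton,
        ← List.append_nil (List.map (fun (m : Nat) => -(4 * (m : Int) + 3)) (List.range r)),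
        List.zip_append (by simp)]
    simp only [List.zip_nil_right, List.append_nil]
    rw [hfold, zipFlat, PySem.List.pyGetD_neg_one_append_singleton]
    rw [show q = (2 * r) + 1 from hr, List.range_succ, List.map_append]
    congr 1
    · apply List.map_congr_left
      intro k hk
      rcases Nat.mod_two_eq_zero_or_one k with hk2 | hk2
      · simp [hk2]
        omega
      · simp [hk2]
        omega
    · have e : (2 * r) % 2 = 0 := by omega
      simp [e]
      ring

-- ===== VERDICT (by name: the statement is the Claim_ definition above) =====
theorem ganjilMix_spec : Claim_equal_ganjilMix := by
  intro batas _
  unfold Spec_ganjilMix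
  rw [A_closed, B_closed]
  apply List.ext_getElem (by simp)
  intro j h1 h2
  have hj : j < batas.toNat / 2 := by
    simpa using h1
  simp only [List.getElem_mapIdx, List.getElem_map, List.getElem_range]
  rcases Nat.mod_two_eq_zero_or_one j with h | h
  · simp [h]
  · simp [h, hj]
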